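-- pv_equiv track=rewrite | github.com/IanPrinsCode/WTC_Python | submission_003-robot-5/maze/imtiyaaz_maze.py | random_maze_creation
-- ===== SOURCE A (Python) =====
-- def random_maze_creation(new_x,new_y,ob_list,x,y):
--     new_ob_list = []
--     x = new_x
--     y = new_y
--
--     if x > 95 or y > 195:
--         return ob_list
--
--     N_start_coord = [x,y]
--     E_start_coord = [x,y]
--     S_start_coord = [x,(y*-1)]
--     W_start_coord = [(x*-1),y]
--
--     NE_start_coord = [x,y]
--     SE_start_coord = [x,(y*-1)]
--     SW_start_coord = [(x*-1),(y*-1)]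
--     NW_start_coord = [(x*-1),y]
--
--     new_ob_list.append(N_start_coord)
--     new_ob_list.append(E_start_coord)
--     new_ob_list.append(S_start_coord)
--     new_ob_list.append(W_start_coord)
--     new_ob_list.append(NE_start_coord)
--     new_ob_list.append(SE_start_coord)
--     new_ob_list.append(SW_start_coord)
--     new_ob_list.append(NW_start_coord)
--     for i in new_ob_list:
--         ob_list.append(i)
--     random_maze_creation(new_x+5,new_y+5,ob_list,x,y)
--     return ob_list
-- ===== SOURCE B (Python) =====
-- def random_maze_creation(new_x, new_y, ob_list, x, y):
--     # closed-form step count instead of recursion; mutates and returns ob_list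
--     n = max(0, min((95 - new_x) // 5, (195 - new_y) // 5) + 1)
--     for k in range(n):
--         cx = new_x + 5 * k
--         cy = new_y + 5 * k
--         ob_list.extend([[cx, cy], [cx, cy], [cx, -cy], [-cx, cy],
--                         [cx, cy], [cx, -cy], [-cx, -cy], [-cx, cy]])
--     return ob_list
-- ===== Notes on version B (the rewrite author's own statement) =====
-- stated objective: simpler
-- what changed: Replaces the tail recursion (which rebuilds an 8-element temporary list and re-tests the bound each call) with a closed-form step count n = max(0, min((95-new_x)//5, (195-new_y)//5)+1) and a single for-loop over range(n) extending ob_list directly; B also avoids Python's recursion limit.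
import Mathlib
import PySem

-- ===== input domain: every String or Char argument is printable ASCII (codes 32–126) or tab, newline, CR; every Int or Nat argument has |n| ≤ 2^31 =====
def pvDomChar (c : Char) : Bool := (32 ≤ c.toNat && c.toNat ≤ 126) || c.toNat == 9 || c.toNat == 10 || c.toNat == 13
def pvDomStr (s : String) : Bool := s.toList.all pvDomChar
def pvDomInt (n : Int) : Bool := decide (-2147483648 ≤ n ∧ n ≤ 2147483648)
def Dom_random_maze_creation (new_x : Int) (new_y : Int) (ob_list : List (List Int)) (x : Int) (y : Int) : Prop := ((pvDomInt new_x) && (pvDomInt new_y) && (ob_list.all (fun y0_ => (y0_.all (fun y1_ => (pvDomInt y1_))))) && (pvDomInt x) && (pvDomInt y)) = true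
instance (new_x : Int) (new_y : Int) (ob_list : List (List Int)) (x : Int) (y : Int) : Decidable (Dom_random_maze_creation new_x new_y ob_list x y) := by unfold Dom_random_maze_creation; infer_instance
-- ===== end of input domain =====

-- B replaces A's tail recursion by a closed-form step count and one loop (simpler; avoids Python's recursion limit). Both mutate ob_list in place in Python; the equivalence proved is about the return value (identical contents).


-- ===== PORT A =====
def random_maze_creation (new_x : Int) (new_y : Int) (ob_list : List (List Int)) (x : Int) (y : Int) : List (List Int) :=
  -- new_ob_list = []; x = new_x; y = new_y
  let x := new_x
  let y := new_y
  if x > 95 ∨ y > 195 then ob_list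
  else
    let nc  : List Int := [x, y]
    let ec  : List Int := [x, y]
    let sc  : List Int := [x, y * (-1)]
    let wc  : List Int := [x * (-1), y]
    let nec : List Int := [x, y]
    let sec : List Int := [x, y * (-1)]
    let swc : List Int := [x * (-1), y * (-1)]
    let nwc : List Int := [x * (-1), y]
    let new_ob_list : List (List Int) := [nc, ec, sc, wc, nec, sec, swc, nwc]
    -- for i in new_ob_list: ob_list.append(i)  (in Lean the mutated list is threaded through the recursive call)
    let ob_list := new_ob_list.foldl (fun acc i => acc ++ [i]) ob_list
    random_maze_creation (new_x + 5) (new_y + 5) ob_list x y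
termination_by ((96 - new_x) ⊓ (196 - new_y)).toNat
decreasing_by omega

-- ===== PORT B =====
def random_maze_creation_alt (new_x : Int) (new_y : Int) (ob_list : List (List Int)) (x : Int) (y : Int) : List (List Int) :=
  let n := max 0 (min (PySem.Int.floordiv (95 - new_x) 5) (PySem.Int.floordiv (195 - new_y) 5) + 1)
  (PySem.List.pyRange 0 n 1).foldl
    (fun acc k =>
      let cx := new_x + 5 * k
      let cy := new_y + 5 * k
      acc ++ [[cx, cy], [cx, cy], [cx, -cy], [-cx, cy], [cx, cy], [cx, -cy], [-cx, -cy], [-cx, cy]])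
    ob_list

-- ===== PRECONDITION & SPEC =====
-- Pre_ excludes the inputs on which Python A raises RecursionError (recursion ~1000 levels deep);
-- the bound 4500 (900 recursive calls) is conservatively inside the region where A still returns.
def Pre_random_maze_creation (new_x : Int) (new_y : Int) (ob_list : List (List Int)) (x : Int) (y : Int) : Prop :=
  new_x > 95 ∨ new_y > 195 ∨ 95 - new_x ≤ 4500 ∨ 195 - new_y ≤ 4500
instance (new_x : Int) (new_y : Int) (ob_list : List (List Int)) (x : Int) (y : Int) : Decidable (Pre_random_maze_creation new_x new_y ob_list x y) := by unfold Pre_random_maze_creation; infer_instance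
def pvWitness_random_maze_creation : Int × Int × List (List Int) × Int × Int := (80, 80, [[1, 2]], 0, 0)

def Spec_random_maze_creation (new_x : Int) (new_y : Int) (ob_list : List (List Int)) (x : Int) (y : Int) (out : List (List Int)) : Prop := out = random_maze_creation_alt new_x new_y ob_list x y
instance (new_x : Int) (new_y : Int) (ob_list : List (List Int)) (x : Int) (y : Int) (out : List (List Int)) : Decidable (Spec_random_maze_creation new_x new_y ob_list x y out) := by unfold Spec_random_maze_creation; infer_instance

-- ===== CLAIM (what is proved, stated in full; the proofs are below) =====
def Claim_equal_random_maze_creation : Prop := ∀ (new_x : Int) (new_y : Int) (ob_list : List (List Int)) (x : Int) (y : Int), Dom_random_maze_creation new_x new_y ob_list x y → Pre_random_maze_creation new_x new_y ob_list x y → Spec_random_maze_creation new_x new_y ob_list x y (random_maze_creation new_x new_y ob_list x y)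

-- ===== LEMMAS AND PROOFS =====

/-- The eight coordinates appended for centre `(a, b)`. -/
def pvEight (a b : Int) : List (List Int) :=
  [[a, b], [a, b], [a, -b], [-a, b], [a, b], [a, -b], [-a, -b], [-a, b]]

/-- The blocks appended over `m` steps starting at `(a, b)`. -/
def pvBlocks : Nat → Int → Int → List (List Int)
  | 0, _, _ => []
  | m + 1, a, b => pvEight a b ++ pvBlocks m (a + 5) (b + 5)

/-- The closed-form step count of B (as a natural number). -/
def pvSteps (a b : Int) : Nat := (min ((95 - a) / 5) ((195 - b) / 5) + 1).toNat

lemma pvSteps_zero_iff (a b : Int) : pvSteps a b = 0 ↔ (a > 95 ∨ b > 195) := by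
  unfold pvSteps; omega

lemma pvSteps_succ (a b : Int) (h : ¬(a > 95 ∨ b > 195)) :
    pvSteps a b = pvSteps (a + 5) (b + 5) + 1 := by
  unfold pvSteps; omega

lemma portA_eq_blocks (m : Nat) :
    ∀ (a b : Int) (obl : List (List Int)) (x y : Int), pvSteps a b = m →
      random_maze_creation a b obl x y = obl ++ pvBlocks m a b := by
  induction m with
  | zero =>
    intro a b obl x y hm
    have h := (pvSteps_zero_iff a b).mp hm
    rw [random_maze_creation]
    simp [h, pvBlocks]
  | succ m ih =>
    intro a b obl x y hm
    have h : ¬(a > 95 ∨ b > 195) := by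
      intro hc; rw [(pvSteps_zero_iff a b).mpr hc] at hm; omega
    have hstep := pvSteps_succ a b h
    rw [random_maze_creation]
    simp only [h, if_false, List.foldl]
    rw [ih (a + 5) (b + 5) _ a b (by omega)]
    simp [pvBlocks, pvEight]

lemma portB_flatMap_eq_blocks (m : Nat) (X Y : Int) :
    ∀ (s n : Int), 0 ≤ s → n - s = (m : Int) →
      (PySem.List.pyRange s n 1).flatMap
        (fun k => pvEight (X + 5 * k) (Y + 5 * k)) = pvBlocks m (X + 5 * s) (Y + 5 * s) := by
  induction m with
  | zero =>
    intro s n _ hm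
    rw [PySem.List.pyRange_one_eq_nil (by omega)]
    simp [pvBlocks]
  | succ m ih =>
    intro s n hs hm
    rw [PySem.List.pyRange_one_cons (by omega)]
    rw [List.flatMap_cons, ih (s + 1) n (by omega) (by omega)]
    simp [pvBlocks]
    congr 1 <;> ring

lemma portB_eq_blocks (a b : Int) (obl : List (List Int)) (x y : Int) :
    random_maze_creation_alt a b obl x y = obl ++ pvBlocks (pvSteps a b) a b := by
  unfold random_maze_creation_alt
  rw [PySem.Int.floordiv_eq_ediv_of_pos (by omega), PySem.Int.floordiv_eq_ediv_of_pos (by omega)]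
  rw [show (fun (acc : List (List Int)) (k : Int) =>
        let cx := a + 5 * k
        let cy := b + 5 * k
        acc ++ [[cx, cy], [cx, cy], [cx, -cy], [-cx, cy], [cx, cy], [cx, -cy], [-cx, -cy], [-cx, cy]])
      = fun acc k => acc ++ pvEight (a + 5 * k) (b + 5 * k) from rfl]
  rw [PySem.List.foldl_append_eq_flatMap]
  congr 1
  have h := portB_flatMap_eq_blocks (pvSteps a b) a b 0
    (max 0 (min ((95 - a) / 5) ((195 - b) / 5) + 1)) le_rfl (by unfold pvSteps; omega)
  simpa using h

-- ===== VERDICT (by name: the statement is the Claim_ definition above) =====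
theorem random_maze_creation_spec : Claim_equal_random_maze_creation := by
  intro new_x new_y ob_list x y _ _
  unfold Spec_random_maze_creation
  rw [portA_eq_blocks (pvSteps new_x new_y) new_x new_y ob_list x y rfl,
    portB_eq_blocks]
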